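-- pv_equiv track=rewrite | github.com/ohmygodel/hs-guard-selection | hs_guard_attack.py | check_for_compromise
-- ===== SOURCE A (Python) =====
-- def check_for_compromise(sample_expiration_times, cur_time, adv_position,
--     surveillance_time):
--     """Checks if adversary in adv_position has surveillance_time left in each previous node
--     before they expire. If so, the HS is compromised via repeated surveillance."""
--     if (adv_position == 0):
--         return True
--     else:
--         if (sample_expiration_times[adv_position-1] >=\
--             cur_time + surveillance_time):
--             return check_for_compromise(sample_expiration_times,
--                 cur_time + surveillance_time, adv_position-1, surveillance_time)
--         else:
--             return False
-- ===== SOURCE B (Python) =====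
-- def check_for_compromise(sample_expiration_times, cur_time, adv_position,
--     surveillance_time):
--     """Same check, but as a single generator over the positions with a
--     closed-form time offset instead of recursion with an accumulated time."""
--     return all(sample_expiration_times[i] >=
--                cur_time + (adv_position - i) * surveillance_time
--                for i in range(adv_position - 1, -1, -1))
-- ===== Notes on version B (the rewrite author's own statement) =====
-- stated objective: alternative
-- what changed: Replaced A's recursion that accumulates cur_time with a single all() over range(adv_position-1,-1,-1) using the closed-form time offset (adv_position - i) * surveillance_time.
-- outside the precondition, e.g. on check_for_compromise([0, 0], 5, -1, 1): A returns False, B returns True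
import Mathlib
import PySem

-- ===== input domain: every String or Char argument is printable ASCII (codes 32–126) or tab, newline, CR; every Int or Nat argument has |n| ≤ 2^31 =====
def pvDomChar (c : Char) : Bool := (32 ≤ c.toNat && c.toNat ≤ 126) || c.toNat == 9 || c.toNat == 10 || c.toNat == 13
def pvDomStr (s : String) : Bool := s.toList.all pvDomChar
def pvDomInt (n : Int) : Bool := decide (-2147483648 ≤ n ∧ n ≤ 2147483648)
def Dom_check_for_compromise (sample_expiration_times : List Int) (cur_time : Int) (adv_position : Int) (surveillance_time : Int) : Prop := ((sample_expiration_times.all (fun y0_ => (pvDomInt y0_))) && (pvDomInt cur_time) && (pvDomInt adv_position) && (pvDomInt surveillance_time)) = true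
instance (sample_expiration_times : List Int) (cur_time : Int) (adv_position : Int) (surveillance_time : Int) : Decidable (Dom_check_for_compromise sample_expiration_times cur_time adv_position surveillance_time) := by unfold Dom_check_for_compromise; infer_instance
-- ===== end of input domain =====

-- B replaces A's time-accumulating recursion with one all() over the positions using a
-- closed-form time offset (objective: alternative decomposition, same cost).

-- ===== PORT A =====
def check_for_compromise (sample_expiration_times : List Int) (cur_time : Int) (adv_position : Int) (surveillance_time : Int) : Bool :=
  if adv_position = 0 then true
  else
    match h : PySem.List.pyGet? sample_expiration_times (adv_position - 1) with
    | none => false   -- Python raises IndexError here (excluded by Pre_)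
    | some x =>
      if x ≥ cur_time + surveillance_time then
        check_for_compromise sample_expiration_times (cur_time + surveillance_time) (adv_position - 1) surveillance_time
      else false
termination_by (adv_position + sample_expiration_times.length).toNat
decreasing_by
  have hin : PySem.Raise.InRange sample_expiration_times.length (adv_position - 1) := by
    by_contra hc
    rw [← PySem.List.pyGet?_eq_none_iff] at hc
    simp [hc] at h
  simp [PySem.Raise.InRange] at hin
  omega

-- ===== PORT B =====
def check_for_compromise_alt (sample_expiration_times : List Int) (cur_time : Int) (adv_position : Int) (surveillance_time : Int) : Bool :=
  (PySem.List.pyRange (adv_position - 1) (-1) (-1)).all (fun i =>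
    match PySem.List.pyGet? sample_expiration_times i with
    | none => false   -- Python raises IndexError here (excluded by Pre_)
    | some x => decide (x ≥ cur_time + (adv_position - i) * surveillance_time))

-- ===== PRECONDITION & SPEC =====
-- Pre_ excludes adv_position outside [0, len]: there A either raises IndexError/RecursionError
-- or returns a value only via Python's accidental negative-index wraparound.
def Pre_check_for_compromise (sample_expiration_times : List Int) (cur_time : Int) (adv_position : Int) (surveillance_time : Int) : Prop :=
  0 ≤ adv_position ∧ adv_position ≤ sample_expiration_times.length
instance (sample_expiration_times : List Int) (cur_time : Int) (adv_position : Int) (surveillance_time : Int) : Decidable (Pre_check_for_compromise sample_expiration_times cur_time adv_position surveillance_time) := by unfold Pre_check_for_compromise; infer_instance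

def pvWitness_check_for_compromise : List Int × Int × Int × Int := ([10, 10, 3], 0, 2, 4)

def Spec_check_for_compromise (sample_expiration_times : List Int) (cur_time : Int) (adv_position : Int) (surveillance_time : Int) (out : Bool) : Prop := out = check_for_compromise_alt sample_expiration_times cur_time adv_position surveillance_time
instance (sample_expiration_times : List Int) (cur_time : Int) (adv_position : Int) (surveillance_time : Int) (out : Bool) : Decidable (Spec_check_for_compromise sample_expiration_times cur_time adv_position surveillance_time out) := by unfold Spec_check_for_compromise; infer_instance

-- ===== CLAIM (what is proved, stated in full; the proofs are below) =====
def Claim_equal_check_for_compromise : Prop := ∀ (sample_expiration_times : List Int) (cur_time : Int) (adv_position : Int) (surveillance_time : Int), Dom_check_for_compromise sample_expiration_times cur_time adv_position surveillance_time → Pre_check_for_compromise sample_expiration_times cur_time adv_position surveillance_time → Spec_check_for_compromise sample_expiration_times cur_time adv_position surveillance_time (check_for_compromise sample_expiration_times cur_time adv_position surveillance_time)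

-- ===== LEMMAS AND PROOFS =====

theorem check_main (n : Nat) : ∀ (ses : List Int) (ct ap st : Int), ap = (n : Int) →
    ap ≤ ses.length →
    check_for_compromise ses ct ap st = check_for_compromise_alt ses ct ap st := by
  induction n with
  | zero =>
    intro ses ct ap st hap _
    have h0 : ap = 0 := by exact_mod_cast hap
    subst h0
    rw [check_for_compromise, check_for_compromise_alt,
      PySem.List.pyRange_neg_one_eq_nil (by norm_num : (0:Int) - 1 ≤ -1)]
    simp
  | succ m ih =>
    intro ses ct ap st hap hlen
    have hap0 : ap ≠ 0 := by omega
    have h1 : (0:Int) ≤ ap - 1 := by omega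
    have h2 : ap - 1 < (ses.length : Int) := by omega
    have hk : (ap - 1).toNat < ses.length := by omega
    have hget : PySem.List.pyGet? ses (ap - 1) = some (ses[(ap-1).toNat]'hk) :=
      PySem.List.pyGet?_eq_some_getElem ses h1 h2
    have hcons : PySem.List.pyRange (ap - 1) (-1) (-1)
        = (ap - 1) :: PySem.List.pyRange (ap - 2) (-1) (-1) := by
      have := PySem.List.pyRange_neg_one_cons (a := ap - 1) (b := -1) (by omega)
      simpa [sub_sub] using this
    have hoff : ap - (ap - 1) = (1 : Int) := by ring
    rw [check_for_compromise]
    rw [check_for_compromise_alt, hcons]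
    simp only [List.all_cons, if_neg hap0, hoff, one_mul]
    split
    · next hnone => rw [hget] at hnone; exact absurd hnone (by simp)
    · next x hx =>
      rw [hget] at hx
      obtain rfl : x = ses[(ap-1).toNat]'hk := (Option.some.inj hx).symm
      have hpred : (fun i => match PySem.List.pyGet? ses i with
            | none => false
            | some x => decide (x ≥ ct + st + (ap - 1 - i) * st))
          = (fun i => match PySem.List.pyGet? ses i with
            | none => false
            | some x => decide (x ≥ ct + (ap - i) * st)) := by
        funext i
        cases PySem.List.pyGet? ses i with
        | none => rfl
        | some x =>
          have : ct + st + (ap - 1 - i) * st = ct + (ap - i) * st := by ring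
          simp only [this]
      by_cases hge : ses[(ap-1).toNat]'hk ≥ ct + st
      · rw [if_pos hge, ih ses (ct + st) (ap - 1) st (by omega) (by omega),
          check_for_compromise_alt, show ap - 1 - 1 = ap - 2 from by ring, hpred]
        simp only [hget]
        rw [decide_eq_true hge, Bool.true_and]
      · rw [if_neg hge]
        simp only [hget]
        rw [decide_eq_false hge, Bool.false_and]

-- ===== VERDICT (by name: the statement is the Claim_ definition above) =====
theorem check_for_compromise_spec : Claim_equal_check_for_compromise := by
  intro ses ct ap st _ hpre
  obtain ⟨h0, hl⟩ := hpre
  unfold Spec_check_for_compromise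
  exact check_main ap.toNat ses ct ap st (by omega) hl
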